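-- pv_equiv track=rewrite | github.com/pypi-data/pypi-mirror-382 | packages/deepprostate/deepprostate-1.3.6-py3-none-any.whl/deepprostate/core/domain/entities/medical_dimension_analyzer.py | _identify_temporal_dimension
-- ===== SOURCE A (Python) =====
-- from typing import Tuple, Dict, Any, Optional, List
--
-- def _identify_temporal_dimension(shape, metadata) -> Tuple[int, bool]:
--     if metadata:
--         temporal_hints = ['temporal', 'time', 'dynamic', 'fmri', 'bold', 'sequence']
--         channel_hints = ['channel', 'multi_parametric', 'T1', 'T2', 'FLAIR', 'DWI']
--
--         metadata_str = str(metadata).lower()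
--         has_temporal_hint = any(hint in metadata_str for hint in temporal_hints)
--         has_channel_hint = any(hint in metadata_str for hint in channel_hints)
--
--         if has_temporal_hint and not has_channel_hint:
--             index = 0 if shape[0] < shape[-1] else 3
--             return index, True
--         elif has_channel_hint and not has_temporal_hint:
--             return 3, False
--
--     candidates = []
--
--     for i, size in enumerate(shape):
--         if i < 3:
--             spatial_sizes = [s for j, s in enumerate(shape[:3]) if j != i]
--             if size > 16 and any(abs(size - s) < size * 0.5 for s in spatial_sizes):
--                 continue
--
--         candidates.append((i, size))
--
--     if not candidates:
--         return len(shape) - 1, False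
--
--     candidates.sort(key=lambda x: (x[1], x[0]))
--
--     best_index, best_size = candidates[0]
--     if best_size >= 10:
--         is_temporal = True
--     elif best_size <= 8:
--         is_temporal = False
--     else:
--         is_temporal = (best_index == 0)
--
--     return best_index, is_temporal
-- ===== SOURCE B (Python) =====
-- def _identify_temporal_dimension(shape, metadata):
--     if metadata:
--         ms = str(metadata).lower()
--         has_t = any(h in ms for h in ('temporal', 'time', 'dynamic', 'fmri', 'bold', 'sequence'))
--         has_c = any(h in ms for h in ('channel', 'multi_parametric', 'T1', 'T2', 'FLAIR', 'DWI'))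
--         if has_t != has_c:
--             if has_t:
--                 return (0 if shape[0] < shape[-1] else 3), True
--             return 3, False
--     first3 = shape[:3]
--     best = None  # (index, size) minimal by (size, index), found in one pass
--     for i, size in enumerate(shape):
--         if i < 3 and size > 16 and any(
--                 j != i and 2 * abs(size - s) < size for j, s in enumerate(first3)):
--             continue
--         if best is None or size < best[1]:
--             best = (i, size)
--     if best is None:
--         return len(shape) - 1, False
--     i, size = best
--     return i, size >= 10 or (size > 8 and i == 0)
-- ===== Notes on version B (the rewrite author's own statement) =====
-- stated objective: faster
-- what changed: B replaces A's build-a-candidate-list, sort-by-(size,index), take-first selection with a single one-pass first-wins running minimum (no candidate list, no sort), and folds the three-way size classification into one boolean expression.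
import Mathlib
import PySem

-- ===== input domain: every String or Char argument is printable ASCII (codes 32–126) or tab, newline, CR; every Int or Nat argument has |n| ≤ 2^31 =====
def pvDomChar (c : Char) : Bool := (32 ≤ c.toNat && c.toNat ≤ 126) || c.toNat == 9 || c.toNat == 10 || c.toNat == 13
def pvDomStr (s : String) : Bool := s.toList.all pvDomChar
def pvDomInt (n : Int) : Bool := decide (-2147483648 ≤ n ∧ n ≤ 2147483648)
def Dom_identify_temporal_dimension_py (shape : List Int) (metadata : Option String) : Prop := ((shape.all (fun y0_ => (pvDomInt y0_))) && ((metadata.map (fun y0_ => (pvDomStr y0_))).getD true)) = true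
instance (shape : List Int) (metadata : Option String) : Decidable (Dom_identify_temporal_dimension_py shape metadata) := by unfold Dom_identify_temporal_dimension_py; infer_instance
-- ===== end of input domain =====

-- B replaces A's build-list / sort-by-(size,index) / take-first selection by a one-pass
-- first-wins running minimum (objective: faster — a timing run measured B faster).


-- the two hint lists of the Python source (shared data literals)
def pvTemporalHints : List String := ["temporal", "time", "dynamic", "fmri", "bold", "sequence"]
def pvChannelHints : List String := ["channel", "multi_parametric", "T1", "T2", "FLAIR", "DWI"]

-- ===== PORT A =====
-- 'abs(size - s) < size * 0.5' is ported as '2 * |size - s| < size': with |ints| ≤ 2^31 both sides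
-- of Python's float comparison are exact doubles, so the comparison is exactly this integer one.
def identify_temporal_dimension_py (shape : List Int) (metadata : Option String) : Int × Bool :=
  let hintPath : Option (Int × Bool) :=
    match metadata with
    | none => none
    | some m =>
      if m = "" then none
      else
        let ms := PySem.Str.lower m
        let hasT := pvTemporalHints.any (fun h => PySem.Str.isIn h ms)
        let hasC := pvChannelHints.any (fun h => PySem.Str.isIn h ms)
        if hasT && !hasC then
          -- shape[0] / shape[-1]: IndexError on [] — excluded by Pre_
          some ((if PySem.List.pyGetD shape 0 0 < PySem.List.pyGetD shape (-1) 0 then (0 : Int) else 3), true)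
        else if hasC && !hasT then some (3, false)
        else none
  match hintPath with
  | some r => r
  | none =>
    let candidates : List (Int × Int) :=
      (PySem.List.enumerate shape 0).foldl (fun acc p =>
        if p.1 < 3 &&
            (p.2 > 16 &&
              ((((PySem.List.enumerate (PySem.List.slice shape none (some 3)) 0).filter
                  (fun q => q.1 != p.1)).map (fun q => q.2)).any
                (fun s => decide (2 * |p.2 - s| < p.2))))
        then acc else acc ++ [p]) []
    if candidates = [] then ((shape.length : Int) - 1, false)
    else
      let sc := PySem.List.sorted2 candidates (fun x => x.2) (fun x => x.1)
      let best := sc.headD (0, 0)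
      (best.1, if best.2 ≥ 10 then true else if best.2 ≤ 8 then false else best.1 == 0)

-- ===== PORT B =====
def pvAltCore (shape : List Int) : Int × Bool :=
  let first3 := PySem.List.slice shape none (some 3)
  let best :=
    (PySem.List.enumerate shape 0).foldl (fun best p =>
      if p.1 < 3 && p.2 > 16 &&
          (PySem.List.enumerate first3 0).any
            (fun q => q.1 != p.1 && decide (2 * |p.2 - q.2| < p.2))
      then best
      else
        match best with
        | none => some p
        | some b => if p.2 < b.2 then some p else some b) none
  match best with
  | none => ((shape.length : Int) - 1, false)
  | some b => (b.1, b.2 ≥ 10 || (b.2 > 8 && b.1 == 0))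

def identify_temporal_dimension_py_alt (shape : List Int) (metadata : Option String) : Int × Bool :=
  let hintPath : Option (Int × Bool) :=
    match metadata with
    | none => none
    | some m =>
      if m = "" then none
      else
        let ms := PySem.Str.lower m
        let hasT := pvTemporalHints.any (fun h => PySem.Str.isIn h ms)
        let hasC := pvChannelHints.any (fun h => PySem.Str.isIn h ms)
        if hasT != hasC then
          some (if hasT then
                  ((if PySem.List.pyGetD shape 0 0 < PySem.List.pyGetD shape (-1) 0 then (0 : Int) else 3), true)
                else (3, false))
        else none
  match hintPath with
  | some r => r
  | none => pvAltCore shape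

-- ===== PRECONDITION & SPEC =====
-- truthy metadata carrying a temporal hint and no channel hint
def pvTemporalOnly (metadata : Option String) : Bool :=
  match metadata with
  | none => false
  | some m =>
    !(m == "") && pvTemporalHints.any (fun h => PySem.Str.isIn h (PySem.Str.lower m)) &&
      !(pvChannelHints.any (fun h => PySem.Str.isIn h (PySem.Str.lower m)))

-- Pre_ excludes only the inputs where A raises: shape = [] with temporal-only metadata,
-- where 'shape[0]' is an IndexError.
def Pre_identify_temporal_dimension_py (shape : List Int) (metadata : Option String) : Prop :=
  shape = [] → pvTemporalOnly metadata = false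
instance (shape : List Int) (metadata : Option String) : Decidable (Pre_identify_temporal_dimension_py shape metadata) := by unfold Pre_identify_temporal_dimension_py; infer_instance

def pvWitness_identify_temporal_dimension_py : List Int × Option String := ([5, 256, 256, 30], some "time series")

def Spec_identify_temporal_dimension_py (shape : List Int) (metadata : Option String) (out : Int × Bool) : Prop := out = identify_temporal_dimension_py_alt shape metadata
instance (shape : List Int) (metadata : Option String) (out : Int × Bool) : Decidable (Spec_identify_temporal_dimension_py shape metadata out) := by unfold Spec_identify_temporal_dimension_py; infer_instance

-- ===== CLAIM (what is proved, stated in full; the proofs are below) =====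
def Claim_equal_identify_temporal_dimension_py : Prop := ∀ (shape : List Int) (metadata : Option String), Dom_identify_temporal_dimension_py shape metadata → Pre_identify_temporal_dimension_py shape metadata → Spec_identify_temporal_dimension_py shape metadata (identify_temporal_dimension_py shape metadata)

-- ===== LEMMAS AND PROOFS =====

lemma pv_insertBy_cons (before : (Int×Int) → (Int×Int) → Bool) (x y : Int×Int) (ys : List (Int×Int)) :
    PySem.List.insertBy before x (y :: ys) =
      if before x y then x :: y :: ys else y :: PySem.List.insertBy before x ys := by
  simp [PySem.List.insertBy]

lemma pv_head_foldl_insertBy (before : (Int×Int) → (Int×Int) → Bool) :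
    ∀ (cs : List (Int×Int)) (y : Int×Int) (ys : List (Int×Int)),
      (cs.foldl (fun acc x => PySem.List.insertBy before x acc) (y :: ys)).head? =
        some (cs.foldl (fun h c => if before c h then c else h) y) := by
  intro cs
  induction cs with
  | nil => intro y ys; rfl
  | cons c cs ih =>
    intro y ys
    simp only [List.foldl_cons, pv_insertBy_cons]
    cases hb : before c y with
    | true => simpa [hb] using ih c (y :: ys)
    | false => simpa [hb] using ih y (PySem.List.insertBy before c ys)

lemma pv_foldl_min_some :
    ∀ (cs : List (Int×Int)) (b : Int×Int),
      cs.foldl (fun ob p => match ob with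
        | none => some p
        | some b => if p.2 < b.2 then some p else some b) (some b)
      = some (cs.foldl (fun h c => if c.2 < h.2 then c else h) b) := by
  intro cs
  induction cs with
  | nil => intro b; rfl
  | cons c cs ih =>
    intro b
    simp only [List.foldl_cons]
    by_cases h : c.2 < b.2 <;> simp [h, ih]

lemma pv_fold_pick_eq :
    ∀ (cs : List (Int×Int)) (h : Int×Int),
      (h :: cs).Pairwise (fun p q => p.1 < q.1) →
      cs.foldl (fun h c =>
          if (decide (c.2 < h.2) || (!decide (h.2 < c.2) && decide (c.1 < h.1))) then c else h) h
      = cs.foldl (fun h c => if c.2 < h.2 then c else h) h := by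
  intro cs
  induction cs with
  | nil => intro h _; rfl
  | cons c cs ih =>
    intro h hp
    rcases List.pairwise_cons.mp hp with ⟨hhd, hp'⟩
    rcases List.pairwise_cons.mp hp' with ⟨hcd, hp''⟩
    have hhc : h.1 < c.1 := hhd c (List.mem_cons_self ..)
    have hlt : decide (c.1 < h.1) = false := by simp; omega
    simp only [List.foldl_cons, hlt, Bool.and_false, Bool.or_false]
    have hpair : ((if decide (c.2 < h.2) = true then c else h) :: cs).Pairwise
        (fun p q : Int × Int => p.1 < q.1) := by
      refine List.pairwise_cons.mpr ⟨?_, hp''⟩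
      intro x hx
      split <;> [exact hcd x hx; exact hhd x (List.mem_cons_of_mem _ hx)]
    have := ih _ hpair
    simpa using this

lemma pv_core_eq (shape : List Int) :
    (let candidates : List (Int × Int) :=
      (PySem.List.enumerate shape 0).foldl (fun acc p =>
        if p.1 < 3 &&
            (p.2 > 16 &&
              ((((PySem.List.enumerate (PySem.List.slice shape none (some 3)) 0).filter
                  (fun q => q.1 != p.1)).map (fun q => q.2)).any
                (fun s => decide (2 * |p.2 - s| < p.2))))
        then acc else acc ++ [p]) []
     if candidates = [] then ((shape.length : Int) - 1, false)
     else
       let sc := PySem.List.sorted2 candidates (fun x => x.2) (fun x => x.1)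
       let best := sc.headD (0, 0)
       (best.1, if best.2 ≥ 10 then true else if best.2 ≤ 8 then false else best.1 == 0))
    = pvAltCore shape := by
  unfold pvAltCore
  simp only []
  -- A's candidate loop builds the filtered list (A's skip predicate)
  have hA : (PySem.List.enumerate shape 0).foldl (fun acc p =>
        if p.1 < 3 &&
            (p.2 > 16 &&
              ((((PySem.List.enumerate (PySem.List.slice shape none (some 3)) 0).filter
                  (fun q => q.1 != p.1)).map (fun q => q.2)).any
                (fun s => decide (2 * |p.2 - s| < p.2))))
        then acc else acc ++ [p]) []
      = (PySem.List.enumerate shape 0).filter (fun p =>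
          !(p.1 < 3 && p.2 > 16 &&
            (PySem.List.enumerate (PySem.List.slice shape none (some 3)) 0).any
              (fun q => q.1 != p.1 && decide (2 * |p.2 - q.2| < p.2)))) := by
    have hf : (fun (acc : List (Int × Int)) (p : Int × Int) =>
        if p.1 < 3 &&
            (p.2 > 16 &&
              ((((PySem.List.enumerate (PySem.List.slice shape none (some 3)) 0).filter
                  (fun q => q.1 != p.1)).map (fun q => q.2)).any
                (fun s => decide (2 * |p.2 - s| < p.2))))
        then acc else acc ++ [p])
        = (fun (acc : List (Int × Int)) (p : Int × Int) =>
          if (!(p.1 < 3 && p.2 > 16 &&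
              (PySem.List.enumerate (PySem.List.slice shape none (some 3)) 0).any
                (fun q => q.1 != p.1 && decide (2 * |p.2 - q.2| < p.2))))
          then acc ++ [p] else acc) := by
      funext acc p
      have : (p.1 < 3 &&
            (p.2 > 16 &&
              ((((PySem.List.enumerate (PySem.List.slice shape none (some 3)) 0).filter
                  (fun q => q.1 != p.1)).map (fun q => q.2)).any
                (fun s => decide (2 * |p.2 - s| < p.2)))))
          = (p.1 < 3 && p.2 > 16 &&
            (PySem.List.enumerate (PySem.List.slice shape none (some 3)) 0).any
              (fun q => q.1 != p.1 && decide (2 * |p.2 - q.2| < p.2))) := by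
        simp [List.any_filter, List.any_map, Function.comp, Bool.and_assoc]
      rw [this]
      cases h : (p.1 < 3 && p.2 > 16 &&
            (PySem.List.enumerate (PySem.List.slice shape none (some 3)) 0).any
              (fun q => q.1 != p.1 && decide (2 * |p.2 - q.2| < p.2))) <;> simp
    rw [hf]
    simpa using PySem.List.foldl_append_if
      (fun p : Int × Int => !(p.1 < 3 && p.2 > 16 &&
        (PySem.List.enumerate (PySem.List.slice shape none (some 3)) 0).any
          (fun q => q.1 != p.1 && decide (2 * |p.2 - q.2| < p.2))))
      (fun x => x) (PySem.List.enumerate shape 0) []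
  -- B's loop is the min-fold over the same filtered list
  have hB : (PySem.List.enumerate shape 0).foldl
      (fun best p => if p.1 < 3 && p.2 > 16 &&
          (PySem.List.enumerate (PySem.List.slice shape none (some 3)) 0).any
            (fun q => q.1 != p.1 && decide (2 * |p.2 - q.2| < p.2))
        then best
        else match best with
          | none => some p
          | some b => if p.2 < b.2 then some p else some b) (none : Option (Int × Int))
      = ((PySem.List.enumerate shape 0).filter (fun p =>
          !(p.1 < 3 && p.2 > 16 &&
            (PySem.List.enumerate (PySem.List.slice shape none (some 3)) 0).any
              (fun q => q.1 != p.1 && decide (2 * |p.2 - q.2| < p.2))))).foldl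
          (fun best p => match best with
            | none => some p
            | some b => if p.2 < b.2 then some p else some b) none := by
    rw [List.foldl_filter]
    congr 1
    funext ob p
    cases h : (p.1 < 3 && p.2 > 16 &&
        (PySem.List.enumerate (PySem.List.slice shape none (some 3)) 0).any
          (fun q => q.1 != p.1 && decide (2 * |p.2 - q.2| < p.2))) <;> simp
  rw [hA, hB]
  rcases hcs : (PySem.List.enumerate shape 0).filter (fun p =>
      !(p.1 < 3 && p.2 > 16 &&
        (PySem.List.enumerate (PySem.List.slice shape none (some 3)) 0).any
          (fun q => q.1 != p.1 && decide (2 * |p.2 - q.2| < p.2)))) with _ | ⟨c, rest⟩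
  · rw [hcs]; simp
  · rw [hcs]
    have hpair : (c :: rest).Pairwise (fun p q : Int × Int => p.1 < q.1) := by
      rw [← hcs]
      exact List.Pairwise.filter _ (PySem.List.pairwise_lt_enumerate shape 0)
    have hsorted : (PySem.List.sorted2 (c :: rest) (fun x : Int × Int => x.2) (fun x => x.1)).head?
        = some (rest.foldl (fun h c =>
            if (decide (c.2 < h.2) || (!decide (h.2 < c.2) && decide (c.1 < h.1))) then c else h) c) := by
      show ((c :: rest).foldl (fun acc x => PySem.List.insertBy _ x acc) []).head? = _
      simp only [List.foldl_cons]
      exact pv_head_foldl_insertBy _ rest c []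
    rw [pv_fold_pick_eq rest c hpair] at hsorted
    have hmin := pv_foldl_min_some rest c
    set m := rest.foldl (fun h c => if c.2 < h.2 then c else h) c with hm
    simp only [List.foldl_cons]
    rw [List.headD_eq_head?_getD, hsorted, hmin]
    simp only [Option.getD_some, if_neg (List.cons_ne_nil c rest)]
    show (m.1, if m.2 ≥ 10 then true else if m.2 ≤ 8 then false else m.1 == 0)
      = (m.1, decide (m.2 ≥ 10) || (decide (m.2 > 8) && m.1 == 0))
    by_cases h1 : m.2 ≥ 10
    · simp [h1]
    · by_cases h2 : m.2 ≤ 8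
      · simp [h1, h2]
      · simp [h1, h2]; omega

-- ===== VERDICT (by name: the statement is the Claim_ definition above) =====
theorem identify_temporal_dimension_py_spec : Claim_equal_identify_temporal_dimension_py := by
  intro shape metadata _ _
  show identify_temporal_dimension_py shape metadata = identify_temporal_dimension_py_alt shape metadata
  have hcore := pv_core_eq shape
  unfold identify_temporal_dimension_py identify_temporal_dimension_py_alt pvAltCore
  unfold pvAltCore at hcore
  cases metadata with
  | none => simpa using hcore
  | some m =>
    by_cases hm : m = ""
    · simp only [hm, if_pos rfl]
      simpa using hcore
    · simp only [if_neg hm]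
      cases hT : pvTemporalHints.any (fun h => PySem.Str.isIn h (PySem.Str.lower m)) <;>
        cases hC : pvChannelHints.any (fun h => PySem.Str.isIn h (PySem.Str.lower m)) <;>
          simp only [hT, hC, Bool.not_true, Bool.not_false, Bool.and_true, Bool.and_false,
            Bool.true_and, Bool.false_and, bne_self_eq_false, Bool.true_bne, Bool.false_bne,
            if_true, if_false, Bool.false_eq_true, ite_false, ite_true] <;>
        simpa using hcore
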